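-- pv_equiv track=rewrite | github.com/aledquin/aledquin.github.io | projs/ddr-hbm-phy-automation-team/ddr-utils-in08/dev/main/bin/hbm3_tier_bound_update.py | bound_check
-- ===== SOURCE A (Python) =====
-- def find_each_and_replace_by(string, substring, separator='x'):
--     """
--     list(find_each_and_replace_by('8989', '89', 'x'))
--     # ['x89', '89x']
--     list(find_each_and_replace_by('9999', '99', 'x'))
--     # ['x99', '9x9', '99x']
--     list(find_each_and_replace_by('9999', '89', 'x'))
--     # []
--     """
--     index = 0
--     while True:
--         index = string.find(substring, index)
--         if index == -1:
--             return
--         yield string[:index] + separator + string[index + len(substring):]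
--         index += 1
--
-- def contains_all_without_overlap(string, numbers):
--     """
--     contains_all_without_overlap("45892190", [89, 90])
--     # True
--     contains_all_without_overlap("45892190", [89, 90, 4521])
--     # False
--     """
--     if len(numbers) == 0:
--         return True
--     substrings = [str(number) for number in numbers]
--     substring = substrings.pop()
--     return any(contains_all_without_overlap(shorter_string, substrings)
--                for shorter_string in find_each_and_replace_by(string, substring, 'x'))
--
-- def bound_check(bound_list, line, reverse):
--     found_flag = False
--     for bounds in bound_list:
--         if bounds:
--             if contains_all_without_overlap(line, list(bounds)):
--                 found_flag = True
--                 break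
--             else:
--                 continue
--     if reverse == 0:
--         return found_flag
--     else:
--         return not found_flag
-- ===== SOURCE B (Python) =====
-- def bound_check(bound_list, line, reverse):
--     found = any(bounds and _matchable(line, [str(n) for n in bounds])
--                 for bounds in bound_list)
--     return (not found) if reverse else found
--
-- def _occurrences(s, sub):
--     # all start indices of sub in s, overlapping included
--     idxs = []
--     j = s.find(sub)
--     while j != -1:
--         idxs.append(j)
--         j = s.find(sub, j + 1)
--     return idxs
--
-- def _matchable(line, subs):
--     # Explicit-stack DFS.  A frame (s, i, k) stands for the string obtained from s by
--     # replacing the occurrence of subs[k] at index i with 'x' (i is None for the root),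
--     # with k substrings still to place; the rewrite is only built when the frame is popped.
--     stack = [(line, None, len(subs))]
--     while stack:
--         s, i, k = stack.pop()
--         if i is not None:
--             s = s[:i] + 'x' + s[i + len(subs[k]):]
--         if k == 0:
--             return True
--         for j in _occurrences(s, subs[k - 1]):
--             stack.append((s, j, k - 1))
--     return False
-- ===== Notes on version B (the rewrite author's own statement) =====
-- stated objective: alternative
-- what changed: Replaces A's lazy generator + recursive any-search (find_each_and_replace_by / contains_all_without_overlap) with a single explicit-stack DFS loop whose frames defer the 'x'-rewrite to pop time and whose occurrence indices are collected once per frame.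
import Mathlib
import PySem

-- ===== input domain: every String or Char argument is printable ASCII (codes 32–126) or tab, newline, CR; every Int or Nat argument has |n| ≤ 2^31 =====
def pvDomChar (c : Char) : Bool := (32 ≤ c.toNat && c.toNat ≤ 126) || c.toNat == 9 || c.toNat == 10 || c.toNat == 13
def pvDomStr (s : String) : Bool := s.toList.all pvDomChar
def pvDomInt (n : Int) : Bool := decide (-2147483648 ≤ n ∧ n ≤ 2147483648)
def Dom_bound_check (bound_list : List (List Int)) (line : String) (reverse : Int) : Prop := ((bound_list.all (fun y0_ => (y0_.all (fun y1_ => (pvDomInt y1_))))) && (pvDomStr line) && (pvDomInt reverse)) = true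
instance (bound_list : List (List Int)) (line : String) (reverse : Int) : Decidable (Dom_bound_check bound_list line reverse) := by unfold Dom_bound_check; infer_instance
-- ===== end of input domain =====

-- B replaces A's generator + recursive any-search with a single explicit-stack DFS loop whose
-- frames defer the 'x'-rewrite to pop time; same asymptotic cost (objective: alternative).

-- ===== PORT A =====
-- find_each_and_replace_by: str.find(sub, index) is PySem.Chars.findFrom (exact); the generator
-- becomes a list built by the same find loop.  The fuel argument only makes the loop total in
-- Lean (the Python loop runs at most len(string)+1 times for the nonempty substrings used here).
def pvOccsA (s sub : List Char) (i fuel : Nat) : List (List Char) :=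
  match fuel with
  | 0 => []
  | fuel + 1 =>
    let r := PySem.Chars.findFrom s sub (i : Int) none
    if r = -1 then []
    else (s.take r.toNat ++ 'x' :: s.drop (r.toNat + sub.length)) :: pvOccsA s sub (r.toNat + 1) fuel

-- contains_all_without_overlap: pop the LAST substring, try every occurrence rewrite.
def pvCawA : List Char → List (List Char) → Bool
  | _, [] => true
  | s, a :: t =>
    (pvOccsA s ((a :: t).getLastD []) 0 (s.length + 1)).any
      (fun s' => pvCawA s' ((a :: t).dropLast))
termination_by _ subs => subs.length
decreasing_by simp

-- the for-loop of bound_check with its break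
def pvLoopA : List (List Int) → List Char → Bool
  | [], _ => false
  | bounds :: rest, l =>
    if bounds.isEmpty then pvLoopA rest l
    else if pvCawA l (bounds.map (fun n => (PySem.Int.toStr n).toList)) then true
    else pvLoopA rest l

def bound_check (bound_list : List (List Int)) (line : String) (reverse : Int) : Bool :=
  let found := pvLoopA bound_list line.toList
  if reverse = 0 then found else !found

-- ===== PORT B =====
-- all start indices of sub in s via repeated str.find (= PySem.Chars.findFrom); fuel only
-- makes the loop total in Lean (at most len(s)+1 finds for the nonempty substrings used here)
def pvOccIdxB (s sub : List Char) (i fuel : Nat) : List Nat :=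
  match fuel with
  | 0 => []
  | fuel + 1 =>
    let r := PySem.Chars.findFrom s sub (i : Int) none
    if r = -1 then []
    else r.toNat :: pvOccIdxB s sub (r.toNat + 1) fuel

-- the explicit-stack DFS loop of _matchable; a frame (s, i?, k) realizes its string on pop
-- (i? = none for the root frame).  fuel only makes the while-loop total in Lean, and
-- pvMatchB passes enough of it for the nonempty substrings this program searches.
def pvDfs (subs : List (List Char)) : Nat → List (List Char × Option Nat × Nat) → Bool
  | 0, _ => false
  | _ + 1, [] => false
  | fuel + 1, a :: t =>
    let top := (a :: t).getLastD ([], none, 0)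
    let rest := (a :: t).dropLast
    let s := match top.2.1 with
      | none => top.1
      | some i => top.1.take i ++ 'x' :: top.1.drop (i + (subs.getD top.2.2 []).length)
    if top.2.2 = 0 then true
    else
      let sub := subs.getD (top.2.2 - 1) []
      pvDfs subs fuel
        (rest ++ (pvOccIdxB s sub 0 (s.length + 1)).map (fun j => (s, some j, top.2.2 - 1)))

def pvMatchB (line : List Char) (subs : List (List Char)) : Bool :=
  pvDfs subs ((line.length + 1) ^ subs.length + 1) [(line, none, subs.length)]

def bound_check_alt (bound_list : List (List Int)) (line : String) (reverse : Int) : Bool :=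
  let found := bound_list.any (fun bounds =>
    !bounds.isEmpty && pvMatchB line.toList (bounds.map (fun n => (PySem.Int.toStr n).toList)))
  if reverse = 0 then found else !found

-- ===== PRECONDITION & SPEC =====
def Spec_bound_check (bound_list : List (List Int)) (line : String) (reverse : Int) (out : Bool) : Prop := out = bound_check_alt bound_list line reverse
instance (bound_list : List (List Int)) (line : String) (reverse : Int) (out : Bool) : Decidable (Spec_bound_check bound_list line reverse out) := by unfold Spec_bound_check; infer_instance

-- ===== CLAIM (what is proved, stated in full; the proofs are below) =====
def Claim_equal_bound_check : Prop := ∀ (bound_list : List (List Int)) (line : String) (reverse : Int), Dom_bound_check bound_list line reverse → Spec_bound_check bound_list line reverse (bound_check bound_list line reverse)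

-- ===== LEMMAS AND PROOFS =====

-- the set of occurrence indices both ports enumerate, as a filtered range
def pvOccIdx (s sub : List Char) : List Nat :=
  (List.range (s.length + 1 - sub.length)).filter (fun i => (s.drop i).take sub.length == sub)

lemma mem_occIdx {s sub : List Char} (hsub : sub ≠ []) {j : Nat} :
    j ∈ pvOccIdx s sub ↔ sub <+: s.drop j := by
  have hm : 0 < sub.length := List.length_pos_iff.mpr hsub
  simp only [pvOccIdx, List.mem_filter, List.mem_range, beq_iff_eq]
  rw [List.prefix_iff_eq_take]
  constructor
  · rintro ⟨_, h2⟩; exact h2.symm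
  · intro h
    have hl : sub.length ≤ (s.drop j).length := by
      conv_lhs => rw [h]
      simp
    simp only [List.length_drop] at hl
    exact ⟨by omega, h.symm⟩

lemma occIdx_pairwise (s sub : List Char) : (pvOccIdx s sub).Pairwise (· < ·) := by
  exact List.pairwise_lt_range.filter _

lemma filter_ge_head_spec {l : List Nat} (hl : l.Pairwise (· < ·)) {i j : Nat} {t : List Nat}
    (h : l.filter (fun x => decide (i ≤ x)) = j :: t) :
    i ≤ j ∧ j ∈ l ∧ (∀ x ∈ l, i ≤ x → j ≤ x) ∧ t = l.filter (fun x => decide (j + 1 ≤ x)) := by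
  induction l generalizing t with
  | nil => simp at h
  | cons a l ih =>
    rw [List.pairwise_cons] at hl
    obtain ⟨ha, hl'⟩ := hl
    by_cases hia : i ≤ a
    · simp only [List.filter_cons, hia, decide_true, if_true] at h
      rw [List.cons.injEq] at h
      obtain ⟨rfl, rfl⟩ := h
      refine ⟨hia, List.mem_cons_self, ?_, ?_⟩
      · intro x hx _
        rcases List.mem_cons.mp hx with rfl | hx
        · exact le_refl _
        · exact le_of_lt (ha x hx)
      · have h1 : l.filter (fun x => decide (i ≤ x)) = l :=
          List.filter_eq_self.mpr (fun x hx => by simp; have := ha x hx; omega)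
        have h2 : l.filter (fun x => decide (a + 1 ≤ x)) = l :=
          List.filter_eq_self.mpr (fun x hx => by simp; have := ha x hx; omega)
        simp only [List.filter_cons]
        rw [h1, h2]
        simp
    · simp only [List.filter_cons, hia, decide_false] at h
      obtain ⟨h1, h2, h3, h4⟩ := ih hl' h
      have haj : a < j := ha j h2
      refine ⟨h1, List.mem_cons_of_mem _ h2, ?_, ?_⟩
      · intro x hx hix
        rcases List.mem_cons.mp hx with rfl | hx
        · omega
        · exact h3 x hx hix
      · simp only [List.filter_cons]
        have : ¬ (j + 1 ≤ a) := by omega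
        simp [this, h4]

lemma findFrom_eq_occIdx (s sub : List Char) (hsub : sub ≠ []) (i : Nat) (hi : i ≤ s.length) :
    PySem.Chars.findFrom s sub (i : Int) none =
      (match ((pvOccIdx s sub).filter (fun j => decide (i ≤ j))).head? with
       | none => -1
       | some j => (j : Int)) := by
  cases h : ((pvOccIdx s sub).filter (fun j => decide (i ≤ j))).head? with
  | none =>
    have hfil : (pvOccIdx s sub).filter (fun j => decide (i ≤ j)) = [] :=
      List.head?_eq_none_iff.mp h
    rw [PySem.Chars.findFrom_natCast_eq_neg_one_iff s sub i hi]
    intro hinf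
    have hin : PySem.Chars.isIn sub (s.drop i) = true :=
      (PySem.Chars.isIn_iff_infix sub (s.drop i)).mpr hinf
    obtain ⟨j', hj'⟩ := (PySem.Chars.exists_prefix_drop_iff_isIn sub (s.drop i)).mpr hin
    rw [List.drop_drop] at hj'
    have hmem : (i + j') ∈ (pvOccIdx s sub).filter (fun j => decide (i ≤ j)) :=
      List.mem_filter.mpr ⟨(mem_occIdx hsub).mpr hj', by simp⟩
    rw [hfil] at hmem
    simp at hmem
  | some j =>
    obtain ⟨t, hfil⟩ := List.head?_eq_some_iff.mp h
    obtain ⟨hij, hjmem, hmin, -⟩ := filter_ge_head_spec (occIdx_pairwise s sub) hfil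
    have hjpre : sub <+: s.drop j := (mem_occIdx hsub).mp hjmem
    have hne : PySem.Chars.findFrom s sub (i : Int) none ≠ -1 := by
      rw [Ne, PySem.Chars.findFrom_natCast_eq_neg_one_iff s sub i hi, not_not]
      rw [← PySem.Chars.isIn_iff_infix]
      rw [← PySem.Chars.exists_prefix_drop_iff_isIn]
      refine ⟨j - i, ?_⟩
      rw [List.drop_drop]
      rwa [(by omega : i + (j - i) = j)]
    obtain ⟨h1, h2, h3⟩ := PySem.Chars.findFrom_natCast_spec s sub i hi hne
    have hr0 : 0 ≤ PySem.Chars.findFrom s sub (i : Int) none := by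
      have : (0 : Int) ≤ (i : Int) := by positivity
      omega
    have hrmem : (PySem.Chars.findFrom s sub (i : Int) none).toNat ∈ pvOccIdx s sub :=
      (mem_occIdx hsub).mpr h2
    have hir : i ≤ (PySem.Chars.findFrom s sub (i : Int) none).toNat := by omega
    have hjr : j ≤ (PySem.Chars.findFrom s sub (i : Int) none).toNat := hmin _ hrmem hir
    have hrj : ¬ (j < (PySem.Chars.findFrom s sub (i : Int) none).toNat) := fun hlt =>
      (h3 j hij hlt) hjpre
    have : PySem.Chars.findFrom s sub (i : Int) none = (j : Int) := by omega
    simp [this]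

lemma occsA_eq {s sub : List Char} (hsub : sub ≠ []) (fuel : Nat) :
    ∀ (i : Nat), i ≤ s.length → s.length + 1 - i ≤ fuel →
    pvOccsA s sub i fuel = ((pvOccIdx s sub).filter (fun j => decide (i ≤ j))).map
        (fun j => s.take j ++ 'x' :: s.drop (j + sub.length)) := by
  have hm : 0 < sub.length := List.length_pos_iff.mpr hsub
  induction fuel with
  | zero => intro i hi hf; omega
  | succ fuel ih =>
    intro i hi hf
    rw [pvOccsA, findFrom_eq_occIdx s sub hsub i hi]
    cases h : ((pvOccIdx s sub).filter (fun j => decide (i ≤ j))).head? with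
    | none =>
      have hfil : (pvOccIdx s sub).filter (fun j => decide (i ≤ j)) = [] :=
        List.head?_eq_none_iff.mp h
      simp [hfil]
    | some j =>
      obtain ⟨t, hfil⟩ := List.head?_eq_some_iff.mp h
      obtain ⟨hij, hjmem, -, htail⟩ := filter_ge_head_spec (occIdx_pairwise s sub) hfil
      have hjb : j < s.length + 1 - sub.length := by
        have := List.mem_range.mp (List.mem_filter.mp hjmem).1
        exact this
      have hlen : (pvOccsA s sub (j + 1) fuel) = ((pvOccIdx s sub).filter
          (fun x => decide (j + 1 ≤ x))).map
          (fun j => s.take j ++ 'x' :: s.drop (j + sub.length)) :=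
        ih (j + 1) (by omega) (by omega)
      simp only [hfil]
      have hj1 : ((j : Int)) ≠ -1 := by omega
      simp only [hj1, if_false, Int.toNat_natCast]
      rw [hlen, ← htail]
      simp

lemma cawA_eq_any (s : List Char) (a : List Char) (t : List (List Char))
    (hsub : (a :: t).getLastD [] ≠ []) :
    pvCawA s (a :: t) = (pvOccIdx s ((a :: t).getLastD [])).any
      (fun j => pvCawA (s.take j ++ 'x' :: s.drop (j + ((a :: t).getLastD []).length))
        ((a :: t).dropLast)) := by
  rw [pvCawA]
  rw [occsA_eq hsub (s.length + 1) 0 (by omega) (by omega)]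
  rw [List.filter_eq_self.mpr (fun x _ => by simp)]
  rw [List.any_map]
  rfl

-- the string a DFS frame stands for
def pvRealize (subs : List (List Char)) (p : List Char × Option Nat × Nat) : List Char :=
  match p.2.1 with
  | none => p.1
  | some i => p.1.take i ++ 'x' :: p.1.drop (i + (subs.getD p.2.2 []).length)

def pvMu (subs : List (List Char)) (stack : List (List Char × Option Nat × Nat)) : Nat :=
  (stack.map (fun p => ((pvRealize subs p).length + 1) ^ p.2.2)).sum

lemma getLastD_take {α : Type} (l : List α) (k : Nat) (d : α) (hk : k < l.length) :
    (l.take (k + 1)).getLastD d = l.getD k d := by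
  rw [List.getLastD_eq_getLast?, List.getLast?_eq_getElem?, List.getD_eq_getElem?_getD]
  have h1 : (List.take (k + 1) l).length = k + 1 := by simp; omega
  rw [h1]
  simp

lemma dropLast_take {α : Type} (l : List α) (k : Nat) (hk : k + 1 ≤ l.length) :
    (l.take (k + 1)).dropLast = l.take k := by
  rw [List.dropLast_eq_take, List.take_take]
  have h1 : (List.take (k + 1) l).length = k + 1 := by simp; omega
  rw [h1]
  simp

lemma occIdxB_eq {s sub : List Char} (hsub : sub ≠ []) (fuel : Nat) :
    ∀ (i : Nat), i ≤ s.length → s.length + 1 - i ≤ fuel →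
    pvOccIdxB s sub i fuel = (pvOccIdx s sub).filter (fun j => decide (i ≤ j)) := by
  have hm : 0 < sub.length := List.length_pos_iff.mpr hsub
  induction fuel with
  | zero => intro i hi hf; omega
  | succ fuel ih =>
    intro i hi hf
    rw [pvOccIdxB, findFrom_eq_occIdx s sub hsub i hi]
    cases h : ((pvOccIdx s sub).filter (fun j => decide (i ≤ j))).head? with
    | none =>
      have hfil : (pvOccIdx s sub).filter (fun j => decide (i ≤ j)) = [] :=
        List.head?_eq_none_iff.mp h
      simp [hfil]
    | some j =>
      obtain ⟨t, hfil⟩ := List.head?_eq_some_iff.mp h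
      obtain ⟨hij, hjmem, -, htail⟩ := filter_ge_head_spec (occIdx_pairwise s sub) hfil
      have hjb : j < s.length + 1 - sub.length :=
        List.mem_range.mp (List.mem_filter.mp hjmem).1
      simp only [hfil]
      have hj1 : ((j : Int)) ≠ -1 := by omega
      simp only [hj1, if_false, Int.toNat_natCast]
      rw [ih (j + 1) (by omega) (by omega), ← htail]

lemma occIdxB_full {s sub : List Char} (hsub : sub ≠ []) :
    pvOccIdxB s sub 0 (s.length + 1) = pvOccIdx s sub := by
  rw [occIdxB_eq hsub (s.length + 1) 0 (by omega) (by omega)]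
  exact List.filter_eq_self.mpr (fun x _ => by simp)

lemma dfs_ne (subs : List (List Char)) (fuel : Nat) (stack : List (List Char × Option Nat × Nat))
    (h : stack ≠ []) :
    pvDfs subs (fuel + 1) stack =
      (if (stack.getLastD ([], none, 0)).2.2 = 0 then true
       else
         pvDfs subs fuel (stack.dropLast ++
           (pvOccIdxB (pvRealize subs (stack.getLastD ([], none, 0)))
              (subs.getD ((stack.getLastD ([], none, 0)).2.2 - 1) [])
              0 ((pvRealize subs (stack.getLastD ([], none, 0))).length + 1)).map
             (fun j => (pvRealize subs (stack.getLastD ([], none, 0)), some j,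
               (stack.getLastD ([], none, 0)).2.2 - 1)))) := by
  cases stack with
  | nil => exact absurd rfl h
  | cons a t =>
    simp only [pvDfs, pvRealize]

lemma dfs_eq (subs : List (List Char)) (hsubs : ∀ sub ∈ subs, sub ≠ []) (fuel : Nat) :
    ∀ (stack : List (List Char × Option Nat × Nat)),
      (∀ p ∈ stack, p.2.2 ≤ subs.length) → pvMu subs stack < fuel →
      pvDfs subs fuel stack = stack.any
        (fun p => pvCawA (pvRealize subs p) (subs.take p.2.2)) := by
  induction fuel with
  | zero => intro stack _ hmu; omega
  | succ fuel ih =>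
    intro stack hinv hmu
    rcases List.eq_nil_or_concat stack with rfl | ⟨rest, top, rfl⟩
    · simp [pvDfs]
    rw [List.concat_eq_append] at hinv hmu ⊢
    rw [dfs_ne subs fuel _ (by simp)]
    simp only [List.getLastD_concat, List.dropLast_concat]
    obtain ⟨s0, io, k⟩ := top
    set sS := pvRealize subs (s0, io, k) with hsS
    by_cases hk0 : k = 0
    · subst hk0
      rw [if_pos rfl, List.any_append]
      simp [pvCawA]
    obtain ⟨k', rfl⟩ : ∃ k', k = k' + 1 := ⟨k - 1, by omega⟩
    rw [if_neg (by omega)]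
    simp only [Nat.add_sub_cancel]
    have hkle : k' + 1 ≤ subs.length := hinv (s0, io, k' + 1) (by simp)
    have hsubne : subs.getD k' [] ≠ [] := by
      rw [List.getD_eq_getElem _ _ (by omega)]
      exact hsubs _ (List.getElem_mem _)
    have hm : 0 < (subs.getD k' []).length := List.length_pos_iff.mpr hsubne
    rw [occIdxB_full hsubne]
    have hlenrw : ∀ i ∈ pvOccIdx sS (subs.getD k' []),
        (sS.take i ++ 'x' :: sS.drop (i + (subs.getD k' []).length)).length ≤ sS.length := by
      intro i hi
      have hib : i < sS.length + 1 - (subs.getD k' []).length :=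
        List.mem_range.mp (List.mem_filter.mp hi).1
      simp only [List.length_append, List.length_take, List.length_cons, List.length_drop]
      omega
    have hcnt : (pvOccIdx sS (subs.getD k' [])).length ≤ sS.length := by
      calc (pvOccIdx sS (subs.getD k' [])).length
          ≤ (List.range (sS.length + 1 - (subs.getD k' []).length)).length :=
            List.length_filter_le _ _
        _ ≤ sS.length := by rw [List.length_range]; omega
    have hmuc : pvMu subs ((pvOccIdx sS (subs.getD k' [])).map
        (fun j => (sS, some j, k')))
        ≤ sS.length * (sS.length + 1) ^ k' := by
      unfold pvMu
      rw [List.map_map]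
      calc (((pvOccIdx sS (subs.getD k' [])).map _).sum : Nat)
          ≤ ((pvOccIdx sS (subs.getD k' [])).map
              ((fun p => ((pvRealize subs p).length + 1) ^ p.2.2) ∘
                fun j => ((sS : List Char), some j, k'))).length
              • ((sS.length + 1) ^ k') := by
            apply List.sum_le_card_nsmul
            intro x hx
            obtain ⟨i, hi, rfl⟩ := List.mem_map.mp hx
            simp only [Function.comp_apply, pvRealize]
            exact Nat.pow_le_pow_left (by have := hlenrw i hi; omega) _
        _ ≤ sS.length * (sS.length + 1) ^ k' := by
            rw [List.length_map, smul_eq_mul]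
            exact Nat.mul_le_mul hcnt le_rfl
    have hpow : 0 < (sS.length + 1) ^ k' := pow_pos (by omega) _
    have hmu' : pvMu subs (rest ++ (pvOccIdx sS (subs.getD k' [])).map
        (fun j => (sS, some j, k'))) < fuel := by
      have hsplit : ∀ (l1 l2 : List (List Char × Option Nat × Nat)),
          pvMu subs (l1 ++ l2) = pvMu subs l1 + pvMu subs l2 := by
        intro l1 l2; simp [pvMu]
      rw [hsplit] at hmu ⊢
      have h1 : pvMu subs [(s0, io, k' + 1)] = (sS.length + 1) ^ (k' + 1) := by
        simp [pvMu, hsS]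
      have h2 : sS.length * (sS.length + 1) ^ k' + (sS.length + 1) ^ k'
          = (sS.length + 1) ^ (k' + 1) := by ring
      omega
    have hinv' : ∀ p ∈ rest ++ (pvOccIdx sS (subs.getD k' [])).map
        (fun j => ((sS : List Char), some j, k')),
        p.2.2 ≤ subs.length := by
      intro p hp
      rcases List.mem_append.mp hp with hp | hp
      · exact hinv p (List.mem_append_left _ hp)
      · obtain ⟨i, -, rfl⟩ := List.mem_map.mp hp
        show k' ≤ subs.length
        omega
    rw [ih _ hinv' hmu']
    rw [List.any_append, List.any_append]
    simp only [List.any_map, List.any_cons, List.any_nil, Bool.or_false]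
    have hne2 : subs.take (k' + 1) ≠ [] := by
      have hlt : (subs.take (k' + 1)).length = k' + 1 := by rw [List.length_take]; omega
      intro h
      rw [h] at hlt
      simp at hlt
    obtain ⟨a0, t0, hts⟩ := List.exists_cons_of_ne_nil hne2
    have hgl : (a0 :: t0).getLastD [] = subs.getD k' [] := by
      rw [← hts, getLastD_take _ _ _ (by omega)]
    have hdl : (a0 :: t0).dropLast = subs.take k' := by
      rw [← hts, dropLast_take _ _ hkle]
    show _ = (_ || pvCawA (pvRealize subs (s0, io, k' + 1)) (subs.take (k' + 1)))
    rw [← hsS, hts, cawA_eq_any sS a0 t0 (hgl ▸ hsubne), hgl, hdl]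
    rfl

lemma toStr_toList_ne_nil (n : Int) : (PySem.Int.toStr n).toList ≠ [] := by
  rw [PySem.Int.toList_toStr]
  unfold PySem.Int.toChars
  split
  · simp
  · intro h
    have : 0 < (Nat.toDigits 10 n.toNat).length := Nat.length_toDigits_pos
    rw [h] at this
    simp at this

lemma match_eq (line : List Char) (subs : List (List Char)) (hsubs : ∀ sub ∈ subs, sub ≠ []) :
    pvMatchB line subs = pvCawA line subs := by
  unfold pvMatchB
  rw [dfs_eq subs hsubs _ [(line, none, subs.length)] (by simp)
    (by simp [pvMu, pvRealize])]
  simp [List.take_length, pvRealize]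

lemma loop_eq (bl : List (List Int)) (l : List Char) :
    pvLoopA bl l = bl.any (fun bounds =>
      !bounds.isEmpty && pvMatchB l (bounds.map (fun n => (PySem.Int.toStr n).toList))) := by
  induction bl with
  | nil => rfl
  | cons b rest ih =>
    simp only [pvLoopA, List.any_cons]
    by_cases hb : b.isEmpty
    · simp [hb, ih]
    · rw [if_neg hb]
      have hsubs : ∀ sub ∈ b.map (fun n => (PySem.Int.toStr n).toList), sub ≠ [] := by
        intro sub hs
        obtain ⟨n, -, rfl⟩ := List.mem_map.mp hs
        exact toStr_toList_ne_nil n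
      rw [match_eq l _ hsubs, ih]
      simp [hb]

-- ===== VERDICT (by name: the statement is the Claim_ definition above) =====
theorem bound_check_spec : Claim_equal_bound_check := by
  intro bl line rev _
  unfold Spec_bound_check bound_check bound_check_alt
  rw [loop_eq]
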